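-- pv_equiv track=rewrite | github.com/yaranasserr/aws | fastprep/5_lexicographically_max_array.py | lexicographically_max_array
-- ===== SOURCE A (Python) =====
-- def lexicographically_max_array(weight, k):
--     n = len(weight)
--     result = []
--     i = 0
--
--     while i < n:
--         max_idx = i
--         for j in range(i + 1, min(i + k + 1, n)):
--             if weight[j] > weight[max_idx]:
--                 max_idx = j
--
--         if max_idx != i:
--             i += 1
--             continue
--
--         result.append(weight[i])
--         i += k + 1
--
--     return result
-- ===== SOURCE B (Python) =====
-- def lexicographically_max_array(weight, k):
--     n = len(weight)
--     # nge[p] = index of the nearest strictly-greater element to the right of p, n if none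
--     nge = [n] * n
--     stack = []
--     for p in range(n - 1, -1, -1):
--         while stack and weight[stack[-1]] <= weight[p]:
--             stack.pop()
--         if stack:
--             nge[p] = stack[-1]
--         stack.append(p)
--     result = []
--     i = 0
--     while i < n:
--         if nge[i] == n or nge[i] - i > k:
--             result.append(weight[i])
--             i += k + 1
--         else:
--             i += 1
--     return result
-- ===== Notes on version B (the rewrite author's own statement) =====
-- stated objective: faster
-- what changed: Replaced A's per-position rescan of the k-wide window by one backward monotone-stack pass computing every next-strictly-greater index, then a single forward scan that tests window dominance in O(1).
import Mathlib
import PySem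

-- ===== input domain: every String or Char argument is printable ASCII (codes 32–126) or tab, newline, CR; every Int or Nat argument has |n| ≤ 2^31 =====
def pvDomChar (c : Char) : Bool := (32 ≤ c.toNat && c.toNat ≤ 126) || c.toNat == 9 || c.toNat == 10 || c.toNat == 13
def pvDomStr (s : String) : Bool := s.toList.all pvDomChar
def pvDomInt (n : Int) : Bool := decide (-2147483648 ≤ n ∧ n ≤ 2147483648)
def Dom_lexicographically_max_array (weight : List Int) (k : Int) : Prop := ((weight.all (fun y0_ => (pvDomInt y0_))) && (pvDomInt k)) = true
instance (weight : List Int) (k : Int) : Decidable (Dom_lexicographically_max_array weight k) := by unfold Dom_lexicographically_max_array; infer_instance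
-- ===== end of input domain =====

-- B replaces A's O(n·k) rescan of each window by a single backward monotone-stack pass
-- computing every next-strictly-greater index, then one forward scan (objective: faster, asymptotic).

-- ===== PORT A =====
-- A's while-loop: fuel-bounded recursion (fuel = len+1 suffices on Pre_, where each step increases i);
-- indices are always in range on Pre_, so weight[x] is ported as pyGetD weight x 0.
def pvALoop (weight : List Int) (k n : Int) : Nat → Int → List Int
  | 0, _ => []
  | fuel+1, i =>
    if i < n then
      let maxIdx := (PySem.List.pyRange (i+1) (min (i+k+1) n) 1).foldl
        (fun m j => if PySem.List.pyGetD weight j 0 > PySem.List.pyGetD weight m 0 then j else m) i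
      if maxIdx ≠ i then pvALoop weight k n fuel (i+1)
      else PySem.List.pyGetD weight i 0 :: pvALoop weight k n fuel (i+k+1)
    else []

def lexicographically_max_array (weight : List Int) (k : Int) : List Int :=
  pvALoop weight k (weight.length : Int) (weight.length + 1) 0

-- ===== PORT B =====
-- one step of Source B's backward pass: pop the stack while top's value ≤ weight[p] (dropWhile),
-- record the next strictly greater index (if any), push p
def pvBStep (weight : List Int) (st : List Int × List Int) (p : Int) : List Int × List Int :=
  let stack := st.2.dropWhile (fun t => decide (PySem.List.pyGetD weight t 0 ≤ PySem.List.pyGetD weight p 0))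
  let nge := match stack with
    | [] => st.1
    | t :: _ => st.1.set p.toNat t
  (nge, p :: stack)

def pvBNge (weight : List Int) : List Int :=
  ((PySem.List.pyRange ((weight.length : Int) - 1) (-1) (-1)).foldl (pvBStep weight)
    (List.replicate weight.length (weight.length : Int), [])).1

def pvBLoop (weight nge : List Int) (k n : Int) : Nat → Int → List Int
  | 0, _ => []
  | fuel+1, i =>
    if i < n then
      let g := PySem.List.pyGetD nge i 0
      if g = n ∨ g - i > k then
        PySem.List.pyGetD weight i 0 :: pvBLoop weight nge k n fuel (i+k+1)
      else pvBLoop weight nge k n fuel (i+1)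
    else []

def lexicographically_max_array_alt (weight : List Int) (k : Int) : List Int :=
  pvBLoop weight (pvBNge weight) k (weight.length : Int) (weight.length + 1) 0

-- ===== PRECONDITION & SPEC =====
-- Pre_ excludes k < 0 with a nonempty list, where A never terminates (i decreases or stalls:
-- it loops forever or eventually raises IndexError); on the empty list A returns [] for any k.
def Pre_lexicographically_max_array (weight : List Int) (k : Int) : Prop :=
  weight = [] ∨ 0 ≤ k
instance (weight : List Int) (k : Int) : Decidable (Pre_lexicographically_max_array weight k) := by
  unfold Pre_lexicographically_max_array; infer_instance

def pvWitness_lexicographically_max_array : List Int × Int := ([3, 1, 4, 2], 1)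

def Spec_lexicographically_max_array (weight : List Int) (k : Int) (out : List Int) : Prop := out = lexicographically_max_array_alt weight k
instance (weight : List Int) (k : Int) (out : List Int) : Decidable (Spec_lexicographically_max_array weight k out) := by unfold Spec_lexicographically_max_array; infer_instance

-- ===== CLAIM (what is proved, stated in full; the proofs are below) =====
def Claim_equal_lexicographically_max_array : Prop := ∀ (weight : List Int) (k : Int), Dom_lexicographically_max_array weight k → Pre_lexicographically_max_array weight k → Spec_lexicographically_max_array weight k (lexicographically_max_array weight k)

-- ===== LEMMAS AND PROOFS =====

-- value at an index, as both ports read it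
def pvW (w : List Int) (x : Int) : Int := PySem.List.pyGetD w x 0

-- index of the first strictly greater element to the right of i (w.length if none)
def pvSpecNge (w : List Int) (i : Int) : Int :=
  match (PySem.List.pyRange (i+1) (w.length : Int) 1).find? (fun j => decide (pvW w i < pvW w j)) with
  | some j => j
  | none => (w.length : Int)

theorem pvSpecNge_gt {w : List Int} {i : Int} (hi : i < (w.length : Int)) :
    i < pvSpecNge w i := by
  unfold pvSpecNge
  cases hf : (PySem.List.pyRange (i+1) (w.length : Int) 1).find? (fun j => decide (pvW w i < pvW w j)) with
  | none => simpa using hi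
  | some j =>
    have := List.mem_of_find?_eq_some hf
    have := (PySem.List.mem_pyRange_one).1 this
    show i < j
    omega

theorem pvSpecNge_le (w : List Int) (i : Int) : pvSpecNge w i ≤ (w.length : Int) := by
  unfold pvSpecNge
  cases hf : (PySem.List.pyRange (i+1) (w.length : Int) 1).find? (fun j => decide (pvW w i < pvW w j)) with
  | none => simp
  | some j =>
    have := List.mem_of_find?_eq_some hf
    have := (PySem.List.mem_pyRange_one).1 this
    show j ≤ (w.length : Int)
    omega

theorem pvSpecNge_val {w : List Int} {i : Int} (h : pvSpecNge w i < (w.length : Int)) :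
    pvW w i < pvW w (pvSpecNge w i) := by
  revert h
  unfold pvSpecNge
  cases hf : (PySem.List.pyRange (i+1) (w.length : Int) 1).find? (fun j => decide (pvW w i < pvW w j)) with
  | none => intro h; exact absurd h (by simp)
  | some j =>
    intro _
    have := List.find?_some hf
    simpa using this

theorem pvSpecNge_gt' {w : List Int} {i : Int} (h : pvSpecNge w i < (w.length : Int)) :
    i < pvSpecNge w i := by
  revert h
  unfold pvSpecNge
  cases hf : (PySem.List.pyRange (i+1) (w.length : Int) 1).find? (fun j => decide (pvW w i < pvW w j)) with
  | none => intro h; exact absurd h (by simp)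
  | some j =>
    intro _
    have := (PySem.List.mem_pyRange_one).1 (List.mem_of_find?_eq_some hf)
    show i < j
    omega

theorem pvSpecNge_gap {w : List Int} {i j : Int} (h1 : i < j) (h2 : j < pvSpecNge w i) :
    pvW w j ≤ pvW w i := by
  have hle := pvSpecNge_le w i
  have hjlen : j < (w.length : Int) := lt_of_lt_of_le h2 hle
  have hjmem : j ∈ PySem.List.pyRange (i+1) (w.length : Int) 1 := by
    rw [PySem.List.mem_pyRange_one]; omega
  by_contra hlt
  push_neg at hlt
  revert h2
  unfold pvSpecNge
  cases hf : (PySem.List.pyRange (i+1) (w.length : Int) 1).find? (fun j => decide (pvW w i < pvW w j)) with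
  | none =>
    have := List.find?_eq_none.1 hf j hjmem
    simp at this
    omega
  | some m =>
    intro h2
    have h2' : j < m := h2
    rcases (List.find?_eq_some_iff_append.1 hf).2 with ⟨as, bs, heq, hfail⟩
    have hpw := PySem.List.pairwise_lt_pyRange_one (a := i+1) (b := (w.length : Int))
    rw [heq] at hpw hjmem
    have hbs : ∀ x ∈ bs, m < x := by
      have := (List.pairwise_append.1 hpw).2.1
      intro x hx
      exact (List.pairwise_cons.1 this).1 x hx
    rcases List.mem_append.1 hjmem with hja | hjc
    · have := hfail j hja
      simp at this
      omega
    · rcases List.mem_cons.1 hjc with rfl | hjb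
      · omega
      · have := hbs j hjb; omega

theorem pvSpecNge_le_witness {w : List Int} {i j : Int} (h1 : i < j)
    (h2 : pvW w i < pvW w j) : pvSpecNge w i ≤ j := by
  by_contra h
  push_neg at h
  exact absurd (pvSpecNge_gap h1 h) (by omega)

theorem pvSpecNge_ge {w : List Int} {i q : Int} (hq : q ≤ (w.length : Int))
    (hgap : ∀ j, i < j → j < q → pvW w j ≤ pvW w i) : q ≤ pvSpecNge w i := by
  by_contra h
  push_neg at h
  have hlen : pvSpecNge w i < (w.length : Int) := lt_of_lt_of_le h hq
  have hgt := pvSpecNge_gt' hlen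
  have hval := pvSpecNge_val hlen
  have := hgap _ hgt h
  omega

-- the chain i, nge[i], nge[nge[i]], … — the content of Source B's stack
def pvChain (w : List Int) (q : Int) : List Int :=
  if h : q < (w.length : Int) then q :: pvChain w (pvSpecNge w q) else []
termination_by ((w.length : Int) - q).toNat
decreasing_by
  have h1 := pvSpecNge_gt h
  have h2 := pvSpecNge_le w q
  omega

theorem pvChain_pop (w : List Int) (p : Int) : ∀ (N : Nat) (q : Int),
    ((w.length : Int) - q).toNat ≤ N → p < q → q ≤ (w.length : Int) →
    (∀ j, p < j → j < q → pvW w j ≤ pvW w p) →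
    (pvChain w q).dropWhile (fun t => decide (pvW w t ≤ pvW w p)) = pvChain w (pvSpecNge w p) := by
  intro N
  induction N with
  | zero =>
    intro q hN hpq hqlen hgap
    have hq : q = (w.length : Int) := by omega
    subst hq
    rw [pvChain, dif_neg (by omega)]
    have hge := pvSpecNge_ge hqlen hgap
    rw [pvChain, dif_neg (by omega)]
    rfl
  | succ N ih =>
    intro q hN hpq hqlen hgap
    by_cases hq : q < (w.length : Int)
    · rw [pvChain, dif_pos hq, List.dropWhile_cons]
      by_cases hw : pvW w q ≤ pvW w p
      · rw [if_pos (by simpa using hw)]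
        have hgtq : q < pvSpecNge w q := pvSpecNge_gt hq
        have hleq := pvSpecNge_le w q
        refine ih (pvSpecNge w q) (by omega) (by omega) hleq ?_
        intro j hj1 hj2
        rcases lt_trichotomy j q with h | h | h
        · exact hgap j hj1 h
        · subst h; exact hw
        · exact le_trans (pvSpecNge_gap h hj2) hw
      · rw [if_neg (by simpa using hw)]
        have hwq : pvW w p < pvW w q := by omega
        have h1 : pvSpecNge w p ≤ q := pvSpecNge_le_witness hpq hwq
        have h2 : q ≤ pvSpecNge w p := pvSpecNge_ge hqlen hgap
        have heq : pvSpecNge w p = q := le_antisymm h1 h2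
        rw [heq]
        conv_rhs => rw [pvChain]
        rw [dif_pos hq]
    · have hq' : q = (w.length : Int) := by omega
      subst hq'
      rw [pvChain, dif_neg (by omega)]
      have hge := pvSpecNge_ge hqlen hgap
      rw [pvChain, dif_neg (by omega)]
      rfl

-- state invariant of Source B's backward fold, processed down to index p
def pvInv (w : List Int) (p : Nat) (st : List Int × List Int) : Prop :=
  st.2 = pvChain w (p : Int) ∧ st.1.length = w.length ∧
  ∀ j : Nat, j < w.length →
    st.1[j]? = some (if p ≤ j then pvSpecNge w (j : Int) else (w.length : Int))

theorem pvFold_desc (w : List Int) : ∀ (p : Nat) (st : List Int × List Int), p ≤ w.length →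
    pvInv w p st →
    pvInv w 0 ((PySem.List.pyRange ((p : Int) - 1) (-1) (-1)).foldl (pvBStep w) st) := by
  intro p
  induction p with
  | zero =>
    intro st _ hinv
    rw [show ((0:Nat):Int) - 1 = -1 by ring]
    rw [PySem.List.pyRange_neg_one_eq_nil (by omega), List.foldl_nil]
    exact hinv
  | succ p ih =>
    intro st hp hinv
    have hplen : p < w.length := by omega
    rw [show (((p+1:Nat)):Int) - 1 = (p:Int) by push_cast; ring]
    rw [PySem.List.pyRange_neg_one_cons (by omega), List.foldl_cons]
    refine ih (pvBStep w st (p : Int)) (by omega) ?_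
    obtain ⟨hst, hlen, hent⟩ := hinv
    have hpop : st.2.dropWhile
        (fun t => decide (PySem.List.pyGetD w t 0 ≤ PySem.List.pyGetD w (p:Int) 0))
        = pvChain w (pvSpecNge w (p:Int)) := by
      have h := pvChain_pop w (p : Int) ((w.length : Int) - ((p:Int)+1)).toNat ((p:Int)+1)
        le_rfl (by omega) (by omega) (by intro j h1 h2; omega)
      rw [hst, show (((p+1:Nat)):Int) = (p:Int)+1 by push_cast; ring]
      exact h
    by_cases hsp : pvSpecNge w (p:Int) < (w.length : Int)
    · have hchain : pvChain w (pvSpecNge w (p:Int))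
          = pvSpecNge w (p:Int) :: pvChain w (pvSpecNge w (pvSpecNge w (p:Int))) := by
        rw [pvChain, dif_pos hsp]
      unfold pvInv pvBStep
      simp only [hpop, hchain]
      refine ⟨?_, ?_, ?_⟩
      · rw [← hchain]
        conv_rhs => rw [pvChain]
        rw [dif_pos (show ((p:Nat):Int) < (w.length : Int) by exact_mod_cast hplen)]
      · simpa using hlen
      · intro j hj
        rw [Int.toNat_natCast]
        by_cases hjp : j = p
        · subst hjp
          rw [List.getElem?_set_self (by omega), if_pos le_rfl]
        · rw [List.getElem?_set_ne (by omega), hent j hj]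
          by_cases hle : p ≤ j
          · rw [if_pos hle, if_pos (by omega)]
          · rw [if_neg hle, if_neg (by omega)]
    · have hsp' : pvSpecNge w (p:Int) = (w.length : Int) :=
        le_antisymm (pvSpecNge_le w _) (by omega)
      have hchain : pvChain w (pvSpecNge w (p:Int)) = [] := by
        rw [pvChain, dif_neg (by omega)]
      unfold pvInv pvBStep
      simp only [hpop, hchain]
      refine ⟨?_, ?_, ?_⟩
      · conv_rhs => rw [pvChain]
        rw [dif_pos (show ((p:Nat):Int) < (w.length : Int) by exact_mod_cast hplen), hchain]
      · exact hlen
      · intro j hj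
        rw [hent j hj]
        by_cases hjp : j = p
        · subst hjp
          rw [if_neg (by omega), if_pos le_rfl, hsp']
        · by_cases hle : p ≤ j
          · rw [if_pos (by omega), if_pos hle]
          · rw [if_neg (by omega), if_neg hle]

theorem pvBNge_spec (w : List Int) : (pvBNge w).length = w.length ∧
    ∀ j : Nat, j < w.length → (pvBNge w)[j]? = some (pvSpecNge w (j : Int)) := by
  have h := pvFold_desc w w.length (List.replicate w.length (w.length : Int), []) le_rfl ?_
  · obtain ⟨_, hlen, hent⟩ := h
    refine ⟨hlen, ?_⟩
    intro j hj
    have := hent j hj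
    rw [if_pos (Nat.zero_le j)] at this
    exact this
  · refine ⟨?_, by simp, ?_⟩
    · show [] = pvChain w ((w.length : Nat) : Int)
      rw [pvChain, dif_neg (by omega)]
    · intro j hj
      rw [if_neg (by omega)]
      show (List.replicate w.length ((w.length : Nat) : Int))[j]? = _
      rw [List.getElem?_replicate, if_pos hj]

theorem pvArgmax_aux (w : List Int) (i : Int) : ∀ (l : List Int) (m : Int),
    pvW w i ≤ pvW w m → (∀ j ∈ l, i < j) →
    ((l.foldl (fun m j => if PySem.List.pyGetD w j 0 > PySem.List.pyGetD w m 0 then j else m) m = i)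
      ↔ (m = i ∧ ∀ j ∈ l, pvW w j ≤ pvW w i)) := by
  intro l
  induction l with
  | nil => intro m _ _; simp
  | cons a l ih =>
    intro m hm hmem
    rw [List.foldl_cons]
    have hia : i < a := hmem a (by simp)
    by_cases ha : PySem.List.pyGetD w a 0 > PySem.List.pyGetD w m 0
    · rw [if_pos ha]
      have hwa : pvW w i < pvW w a := lt_of_le_of_lt hm ha
      rw [ih a (le_of_lt hwa) (fun j hj => hmem j (List.mem_cons_of_mem _ hj))]
      constructor
      · rintro ⟨rfl, _⟩
        exact absurd hia (lt_irrefl _)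
      · rintro ⟨rfl, hall⟩
        exact absurd (hall a List.mem_cons_self) (by exact not_le.2 hwa)
    · rw [if_neg ha]
      rw [ih m hm (fun j hj => hmem j (List.mem_cons_of_mem _ hj))]
      constructor
      · rintro ⟨rfl, hall⟩
        refine ⟨rfl, ?_⟩
        intro j hj
        rcases List.mem_cons.1 hj with rfl | hj'
        · exact le_trans (not_lt.1 ha) hm
        · exact hall j hj'
      · rintro ⟨rfl, hall⟩
        exact ⟨rfl, fun j hj => hall j (List.mem_cons_of_mem _ hj)⟩

theorem pvCond_iff (w : List Int) (k : Int) {i : Int} (h0 : 0 ≤ i) (hn : i < (w.length : Int)) :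
    ((PySem.List.pyRange (i+1) (min (i+k+1) (w.length : Int)) 1).foldl
        (fun m j => if PySem.List.pyGetD w j 0 > PySem.List.pyGetD w m 0 then j else m) i = i)
      ↔ (pvSpecNge w i = (w.length : Int) ∨ pvSpecNge w i - i > k) := by
  rw [pvArgmax_aux w i _ i le_rfl (by
    intro j hj
    have := (PySem.List.mem_pyRange_one).1 hj
    omega)]
  have hle := pvSpecNge_le w i
  constructor
  · rintro ⟨_, hall⟩
    have hge : min (i+k+1) (w.length : Int) ≤ pvSpecNge w i := by
      refine pvSpecNge_ge (min_le_right _ _) ?_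
      intro j h1 h2
      exact hall j (by rw [PySem.List.mem_pyRange_one]; omega)
    omega
  · intro hs
    refine ⟨rfl, ?_⟩
    intro j hj
    rw [PySem.List.mem_pyRange_one] at hj
    refine pvSpecNge_gap (by omega) (by omega)

theorem pvLoops_eq (w : List Int) (k : Int) (hk : 0 ≤ k) : ∀ (fuel : Nat) (i : Int), 0 ≤ i →
    pvALoop w k (w.length : Int) fuel i = pvBLoop w (pvBNge w) k (w.length : Int) fuel i := by
  intro fuel
  induction fuel with
  | zero => intro i _; rfl
  | succ fuel ih =>
    intro i hi
    simp only [pvALoop, pvBLoop]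
    by_cases hlt : i < (w.length : Int)
    · rw [if_pos hlt, if_pos hlt]
      obtain ⟨hlen, hent⟩ := pvBNge_spec w
      have hg : PySem.List.pyGetD (pvBNge w) i 0 = pvSpecNge w i := by
        have h1 : i.toNat < (pvBNge w).length := by omega
        have h2 := hent i.toNat (by omega)
        have h3 : ((i.toNat : Nat) : Int) = i := by omega
        rw [h3] at h2
        rw [← h3, PySem.List.pyGetD_natCast, List.getD_eq_getElem?_getD, h2, h3]
        rfl
      have hcond := pvCond_iff w k hi hlt
      rw [hg]
      by_cases hc : pvSpecNge w i = (w.length : Int) ∨ pvSpecNge w i - i > k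
      · rw [if_pos hc, if_neg (by simpa using hcond.2 hc)]
        rw [ih (i+k+1) (by omega)]
      · rw [if_neg hc]
        have hne : ¬ ((PySem.List.pyRange (i+1) (min (i+k+1) (w.length : Int)) 1).foldl
            (fun m j => if PySem.List.pyGetD w j 0 > PySem.List.pyGetD w m 0 then j else m) i = i) :=
          fun h => hc (hcond.1 h)
        rw [if_pos hne]
        exact ih (i+1) (by omega)
    · rw [if_neg hlt, if_neg hlt]

-- ===== VERDICT (by name: the statement is the Claim_ definition above) =====
theorem lexicographically_max_array_spec : Claim_equal_lexicographically_max_array := by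
  intro weight k _ hpre
  unfold Spec_lexicographically_max_array lexicographically_max_array lexicographically_max_array_alt
  rcases hpre with h | h
  · subst h; rfl
  · exact pvLoops_eq weight k h _ 0 le_rfl
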